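-- pv_equiv track=rewrite | github.com/bbelderbos/bobcodesit | index.py | _filter_valid_tag_lines
-- ===== SOURCE A (Python) =====
-- def _filter_valid_tag_lines(filename, lines: list[str]) -> list[str]:
--     in_code_block = False
--     tag_lines = []
--     for line in lines:
--         if line.strip().startswith("```"):
--             in_code_block = not in_code_block
--             continue
--         if not in_code_block and line.startswith("#"):
--             tag_lines.append(line)
--     return tag_lines
-- ===== SOURCE B (Python) =====
-- def _filter_valid_tag_lines(filename, lines: list[str]) -> list[str]:
--     # Phase 1: split into fence-delimited segments (fence lines discarded).
--     segments = []
--     cur = []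
--     for line in lines:
--         if line.strip().startswith("```"):
--             segments.append(cur)
--             cur = []
--         else:
--             cur.append(line)
--     segments.append(cur)
--     # Phase 2: even-indexed segments are outside code blocks; keep '#' lines.
--     out = []
--     for i, seg in enumerate(segments):
--         if i % 2 == 0:
--             for line in seg:
--                 if line.startswith("#"):
--                     out.append(line)
--     return out
-- ===== Notes on version B (the rewrite author's own statement) =====
-- stated objective: alternative
-- what changed: Replaced the single stateful in_code_block boolean pass with a two-phase build-then-filter: first split the lines into fence-delimited segments, then collect '#' lines from even-indexed (outside-code) segments.
import Mathlib
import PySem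

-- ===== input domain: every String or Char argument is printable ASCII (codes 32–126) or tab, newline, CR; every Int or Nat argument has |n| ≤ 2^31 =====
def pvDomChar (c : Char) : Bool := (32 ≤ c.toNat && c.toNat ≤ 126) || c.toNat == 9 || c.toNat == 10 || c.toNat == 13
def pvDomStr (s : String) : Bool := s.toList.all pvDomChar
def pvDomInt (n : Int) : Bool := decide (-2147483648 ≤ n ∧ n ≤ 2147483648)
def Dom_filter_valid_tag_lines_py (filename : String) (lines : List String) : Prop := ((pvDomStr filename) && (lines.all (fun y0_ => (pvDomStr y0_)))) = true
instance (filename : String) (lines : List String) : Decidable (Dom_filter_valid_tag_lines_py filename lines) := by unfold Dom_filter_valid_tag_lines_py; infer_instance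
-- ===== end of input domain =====

-- B replaces A's single stateful in_code_block pass by a two-phase build-then-filter
-- (split into fence-delimited segments, then keep '#' lines of even-indexed segments); alternative decomposition, same cost.

-- ===== PORT A =====
def pvFence (line : String) : Bool := PySem.Str.startswith (PySem.Str.strip line) "```"

def pvTag (line : String) : Bool := PySem.Str.startswith line "#"

def filter_valid_tag_lines_py (filename : String) (lines : List String) : List String :=
  (lines.foldl
    (fun (st : Bool × List String) line =>
      if pvFence line then (!st.1, st.2)
      else if !st.1 && pvTag line then (st.1, st.2 ++ [line])
      else st)
    (false, [])).2

-- ===== PORT B =====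
-- phase 1 state: (segments so far, current segment)
def pvSplitStep (st : List (List String) × List String) (line : String) : List (List String) × List String :=
  if pvFence line then (st.1 ++ [st.2], []) else (st.1, st.2 ++ [line])

def filter_valid_tag_lines_py_alt (filename : String) (lines : List String) : List String :=
  let st := lines.foldl pvSplitStep ([], [])
  let segments := st.1 ++ [st.2]
  (PySem.List.enumerate segments).foldl
    (fun out iseg =>
      if iseg.1 % 2 == 0 then
        iseg.2.foldl (fun out line => if pvTag line then out ++ [line] else out) out
      else out)
    []

-- ===== PRECONDITION & SPEC =====
def Spec_filter_valid_tag_lines_py (filename : String) (lines : List String) (out : List String) : Prop := out = filter_valid_tag_lines_py_alt filename lines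
instance (filename : String) (lines : List String) (out : List String) : Decidable (Spec_filter_valid_tag_lines_py filename lines out) := by unfold Spec_filter_valid_tag_lines_py; infer_instance

-- ===== CLAIM (what is proved, stated in full; the proofs are below) =====
def Claim_equal_filter_valid_tag_lines_py : Prop := ∀ (filename : String) (lines : List String), Dom_filter_valid_tag_lines_py filename lines → Spec_filter_valid_tag_lines_py filename lines (filter_valid_tag_lines_py filename lines)

-- ===== LEMMAS AND PROOFS =====

-- reference recursion: A's remaining output given the current in_code_block flag
def pvSpec (b : Bool) : List String → List String
  | [] => []
  | l :: ls =>
    if pvFence l then pvSpec (!b) ls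
    else if !b && pvTag l then l :: pvSpec b ls
    else pvSpec b ls

-- A's fold from any state equals accumulated prefix ++ pvSpec
theorem pvA_fold (ls : List String) (b : Bool) (acc : List String) :
    (ls.foldl
      (fun (st : Bool × List String) line =>
        if pvFence line then (!st.1, st.2)
        else if !st.1 && pvTag line then (st.1, st.2 ++ [line])
        else st)
      (b, acc)).2 = acc ++ pvSpec b ls := by
  induction ls generalizing b acc with
  | nil => simp [pvSpec]
  | cons l ls ih =>
    rw [List.foldl_cons]
    by_cases hf : pvFence l = true
    · simp only [hf, if_true, pvSpec]
      exact ih (!b) acc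
    · have hf' : pvFence l = false := by simpa using hf
      by_cases ht : (!b && pvTag l) = true
      · simp only [hf', Bool.false_eq_true, if_false, ht, if_true, pvSpec]
        rw [ih]
        simp
      · have ht' : (!b && pvTag l) = false := by simpa using ht
        simp only [hf', Bool.false_eq_true, if_false, ht', pvSpec]
        exact ih b acc

-- reference recursion for phase 1: segments produced from current segment c
def pvSegs (c : List String) : List String → List (List String)
  | [] => [c]
  | l :: ls => if pvFence l then c :: pvSegs [] ls else pvSegs (c ++ [l]) ls

theorem pvB_fold1 (ls : List String) (S : List (List String)) (c : List String) :
    (ls.foldl pvSplitStep (S, c)).1 ++ [(ls.foldl pvSplitStep (S, c)).2] = S ++ pvSegs c ls := by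
  induction ls generalizing S c with
  | nil => simp [pvSegs]
  | cons l ls ih =>
    rw [List.foldl_cons]
    by_cases hf : pvFence l = true
    · simp only [pvSplitStep, pvSegs, hf, if_true]
      rw [ih]
      simp
    · have hf' : pvFence l = false := by simpa using hf
      simp only [pvSplitStep, pvSegs, hf', Bool.false_eq_true, if_false]
      exact ih S (c ++ [l])

-- reference recursion for phase 2 with running index
def pvPhase2 (i : Nat) : List (List String) → List String
  | [] => []
  | s :: r => (if i % 2 == 0 then s.filter pvTag else []) ++ pvPhase2 (i + 1) r

theorem pvB_fold2 (segs : List (List String)) (i : Nat) (out : List String) :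
    ((PySem.List.enumerate segs (i : Int)).foldl
      (fun out iseg =>
        if iseg.1 % 2 == 0 then
          iseg.2.foldl (fun out line => if pvTag line then out ++ [line] else out) out
        else out)
      out) = out ++ pvPhase2 i segs := by
  induction segs generalizing i out with
  | nil => simp [PySem.List.enumerate_nil, pvPhase2]
  | cons s r ih =>
    simp only [PySem.List.enumerate_cons, List.foldl_cons, pvPhase2]
    by_cases h : ((i : Int) % 2 == 0) = true
    · have h' : (i : Int) % 2 = 0 := beq_iff_eq.mp h
      have h2 : (i % 2 == 0) = true := by
        simp only [beq_iff_eq]; omega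
      have : ((i : Int) + 1) = ((i + 1 : Nat) : Int) := by push_cast; ring
      rw [h, if_pos rfl, PySem.List.foldl_append_if_eq_filter, this, ih]
      simp [h2]
    · have h' : ¬ ((i : Int) % 2 = 0) := fun e => h (beq_iff_eq.mpr e)
      have h2 : (i % 2 == 0) = false := by
        simp only [beq_eq_false_iff_ne, ne_eq]; omega
      have : ((i : Int) + 1) = ((i + 1 : Nat) : Int) := by push_cast; ring
      rw [if_neg (by simpa using h), this, ih]
      simp [h2]

-- key bridge: phase2 over the segmentation equals the pending current segment's
-- contribution plus A's reference recursion, parity i even ↔ outside code block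
theorem pvBridge (ls : List String) (i : Nat) (c : List String) :
    pvPhase2 i (pvSegs c ls) =
      (if i % 2 == 0 then c.filter pvTag else []) ++ pvSpec (decide (i % 2 ≠ 0)) ls := by
  induction ls generalizing i c with
  | nil => simp [pvSegs, pvPhase2, pvSpec]
  | cons l ls ih =>
    simp only [pvSegs, pvSpec]
    by_cases hf : pvFence l
    · simp only [hf, if_true]
      simp only [pvPhase2, ih]
      by_cases he : i % 2 = 0
      · have h1 : (i + 1) % 2 = 1 := by omega
        simp [he, h1]
      · have h1 : (i + 1) % 2 = 0 := by omega
        have hi : i % 2 = 1 := by omega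
        simp [hi, h1]
    · have hf' : pvFence l = false := by simpa using hf
      simp only [hf', Bool.false_eq_true, if_false]
      rw [ih]
      by_cases he : i % 2 = 0
      · have hnb : (decide (i % 2 ≠ 0)) = false := by simp [he]
        simp only [he]
        by_cases ht : pvTag l
        · simp [ht, List.filter_append]
        · simp [ht, List.filter_append]
      · have hnb : (decide (i % 2 ≠ 0)) = true := by simp [he]
        have hi : (i % 2 == 0) = false := by simp [he]
        simp only [hi, hnb, Bool.false_eq_true, if_false, Bool.not_true, Bool.false_and,
          List.nil_append]

-- ===== VERDICT (by name: the statement is the Claim_ definition above) =====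
theorem filter_valid_tag_lines_py_spec : Claim_equal_filter_valid_tag_lines_py := by
  intro filename lines _
  unfold Spec_filter_valid_tag_lines_py filter_valid_tag_lines_py filter_valid_tag_lines_py_alt
  rw [pvA_fold]
  show pvSpec false lines =
    (PySem.List.enumerate ((lines.foldl pvSplitStep ([], [])).1 ++ [(lines.foldl pvSplitStep ([], [])).2]) ((0 : Nat) : Int)).foldl _ []
  rw [pvB_fold2, pvB_fold1]
  simp [pvBridge]
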